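-- pv_equiv track=rewrite | github.com/ELGarulli/neurokin | neurokin/utils/experiments/neural_states_helper.py | condense_neural_event_types
-- ===== SOURCE A (Python) =====
-- def condense_neural_event_types(cond_animal_event_dict):
--     """
--     Condenses the dataset from the five categories analysis
--     ["fog_active", "fog_rest", "nlm_active", "nlm_rest", gait] to only
--     three categories ["fog", "nlm", "gait"]
--     :param cond_animal_event_dict: states dictionary structured as condition, animal, events.
--     :return: same dictionary with 3 conditions instead of 5
--     """
--     conditions_of_interest = list(cond_animal_event_dict.keys())
--     five2three = {c: {} for c in conditions_of_interest}
--     for condition in conditions_of_interest: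
--         for animal, events in cond_animal_event_dict[condition].items():
--             five2three[condition][animal] = {}
--             for event_type, psds in events.items():
--                 if event_type in ["fog_active", "fog_rest"]:
--                     five2three[condition][animal].setdefault("fog", [])
--                     five2three[condition][animal]["fog"] += psds
--                 elif event_type in ["nlm_active", "nlm_rest"]:
--                     five2three[condition][animal].setdefault("nlm", [])
--                     five2three[condition][animal]["nlm"] += psds
--                 else:
--                     five2three[condition][animal].setdefault("gait", [])
--                     five2three[condition][animal]["gait"] += psds
--     return five2three
-- ===== SOURCE B (Python) =====
-- def condense_neural_event_types(cond_animal_event_dict):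
--     """Per-category gather: for each animal, build each condensed category by
--     collecting every matching psds list, instead of routing events one by one."""
--     def cat(event_type):
--         if event_type in ("fog_active", "fog_rest"):
--             return "fog"
--         if event_type in ("nlm_active", "nlm_rest"):
--             return "nlm"
--         return "gait"
--
--     return {
--         condition: {
--             animal: {
--                 c: [p for e, ps in events.items() if cat(e) == c for p in ps]
--                 for c in dict.fromkeys(cat(e) for e in events)
--             }
--             for animal, events in animals.items()
--         }
--         for condition, animals in cond_animal_event_dict.items()
--     }
-- ===== Notes on version B (the rewrite author's own statement) =====
-- stated objective: alternative
-- what changed: A routes events one by one into a mutable bucket dict with setdefault/+=; B builds each condensed category directly, deduplicating the category names in first-occurrence order and gathering all matching psds lists per category with nested dict/list comprehensions.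
import Mathlib
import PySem

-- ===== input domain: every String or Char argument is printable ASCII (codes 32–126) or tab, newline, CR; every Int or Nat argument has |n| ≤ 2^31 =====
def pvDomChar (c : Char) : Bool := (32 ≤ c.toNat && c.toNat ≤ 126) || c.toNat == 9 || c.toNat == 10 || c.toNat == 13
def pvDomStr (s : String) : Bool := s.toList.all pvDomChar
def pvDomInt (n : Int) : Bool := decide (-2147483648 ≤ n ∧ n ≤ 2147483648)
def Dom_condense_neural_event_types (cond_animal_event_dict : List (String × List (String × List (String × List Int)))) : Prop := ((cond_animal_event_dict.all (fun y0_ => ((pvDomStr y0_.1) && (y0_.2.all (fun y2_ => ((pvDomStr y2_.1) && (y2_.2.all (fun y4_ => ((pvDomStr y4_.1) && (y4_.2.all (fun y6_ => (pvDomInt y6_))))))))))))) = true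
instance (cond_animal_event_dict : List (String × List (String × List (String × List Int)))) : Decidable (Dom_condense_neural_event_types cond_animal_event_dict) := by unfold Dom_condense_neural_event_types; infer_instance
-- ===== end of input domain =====

-- B condenses per target category (dedup of category names, then one gather per category)
-- instead of A's one-by-one routing into a mutable bucket dict; same values, a different decomposition.

-- ===== PORT A =====
-- inner loop body: 'setdefault(cat, []); d[cat] += psds' is exactly Dict.modify cat [] (· ++ psds)
def pvStepA (d : PySem.Dict String (List Int)) (ev : String × List Int) : PySem.Dict String (List Int) :=
  if ev.1 ∈ ["fog_active", "fog_rest"] then d.modify "fog" [] (· ++ ev.2)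
  else if ev.1 ∈ ["nlm_active", "nlm_rest"] then d.modify "nlm" [] (· ++ ev.2)
  else d.modify "gait" [] (· ++ ev.2)

def condense_neural_event_types (cond_animal_event_dict : List (String × List (String × List (String × List Int)))) : List (String × List (String × List (String × List Int))) :=
  let conditions_of_interest := cond_animal_event_dict.map (·.1)
  conditions_of_interest.foldl (fun five2three condition =>
    let animals := (PySem.Dict.mk cond_animal_event_dict).getD condition []
    five2three ++ [(condition,
      animals.foldl (fun acc aev =>
        acc ++ [(aev.1, (aev.2.foldl pvStepA PySem.Dict.empty).items)]) [])]) []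

-- ===== PORT B =====
def pvCat (event_type : String) : String :=
  if event_type ∈ ["fog_active", "fog_rest"] then "fog"
  else if event_type ∈ ["nlm_active", "nlm_rest"] then "nlm"
  else "gait"

def pvGather (events : List (String × List Int)) (c : String) : List Int :=
  ((events.filter (fun ev => pvCat ev.1 == c)).map (·.2)).flatten

def condense_neural_event_types_alt (cond_animal_event_dict : List (String × List (String × List (String × List Int)))) : List (String × List (String × List (String × List Int))) :=
  cond_animal_event_dict.map (fun ca =>
    (ca.1, ca.2.map (fun ae =>
      (ae.1, (PySem.List.dedup (ae.2.map (fun ev => pvCat ev.1))).map (fun c => (c, pvGather ae.2 c))))))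

-- ===== PRECONDITION & SPEC =====
-- Pre_ requires unique keys at every nesting level: the Python argument is a dict of dicts of
-- dicts, which cannot carry duplicate keys, and on duplicate-key association lists neither raw-list
-- reading corresponds to what the Python functions (which only ever see the collapsed dict) compute.
def Pre_condense_neural_event_types (cond_animal_event_dict : List (String × List (String × List (String × List Int)))) : Prop :=
  (cond_animal_event_dict.map (·.1)).Nodup ∧
  ∀ ca ∈ cond_animal_event_dict, (ca.2.map (·.1)).Nodup ∧
    ∀ ae ∈ ca.2, (ae.2.map (·.1)).Nodup
instance (cond_animal_event_dict : List (String × List (String × List (String × List Int)))) : Decidable (Pre_condense_neural_event_types cond_animal_event_dict) := by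
  unfold Pre_condense_neural_event_types
  letI p1 : ∀ ae : String × List (String × List Int), Decidable ((ae.2.map (·.1)).Nodup) := fun _ => inferInstance
  letI p2 : ∀ ca : String × List (String × List (String × List Int)), Decidable (∀ ae ∈ ca.2, ((ae.2.map (·.1)).Nodup)) := fun _ => inferInstance
  infer_instance

def pvWitness_condense_neural_event_types : (List (String × List (String × List (String × List Int)))) :=
  [("baseline", [("NWE00052", [("fog_active", [1, 2]), ("gait", [3]), ("fog_rest", [4])])]),
   ("sham", [])]

def Spec_condense_neural_event_types (cond_animal_event_dict : List (String × List (String × List (String × List Int)))) (out : List (String × List (String × List (String × List Int)))) : Prop := out = condense_neural_event_types_alt cond_animal_event_dict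
instance (cond_animal_event_dict : List (String × List (String × List (String × List Int)))) (out : List (String × List (String × List (String × List Int)))) : Decidable (Spec_condense_neural_event_types cond_animal_event_dict out) := by
  unfold Spec_condense_neural_event_types
  letI d1 : DecidableEq (List (String × List Int)) := inferInstance
  letI d2 : DecidableEq (List (String × List (String × List Int))) := inferInstance
  letI d3 : DecidableEq (List (String × List (String × List (String × List Int)))) := inferInstance
  infer_instance

-- ===== CLAIM (what is proved, stated in full; the proofs are below) =====
def Claim_equal_condense_neural_event_types : Prop := ∀ (cond_animal_event_dict : List (String × List (String × List (String × List Int)))), Dom_condense_neural_event_types cond_animal_event_dict → Pre_condense_neural_event_types cond_animal_event_dict → Spec_condense_neural_event_types cond_animal_event_dict (condense_neural_event_types cond_animal_event_dict)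

-- ===== LEMMAS AND PROOFS =====

-- A's routing step is a modify keyed by the event's condensed category.
theorem pvStepA_eq (d : PySem.Dict String (List Int)) (ev : String × List Int) :
    pvStepA d ev = d.modify (pvCat ev.1) [] (· ++ ev.2) := by
  unfold pvStepA pvCat
  split_ifs <;> rfl

theorem pvGetD_foldl_modify (l : List (String × List Int)) (d : PySem.Dict String (List Int)) (c : String) :
    (l.foldl (fun d ev => d.modify (pvCat ev.1) [] (· ++ ev.2)) d).getD c [] =
      d.getD c [] ++ pvGather l c := by
  induction l generalizing d with
  | nil => simp [pvGather]
  | cons ev rest ih =>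
    rw [List.foldl_cons, ih]
    by_cases h : pvCat ev.1 = c
    · simp [pvGather, h, List.append_assoc]
    · simp [pvGather, PySem.Dict.getD_modify, h, Ne.symm h]

theorem pvInner_eq (events : List (String × List Int)) :
    (events.foldl pvStepA PySem.Dict.empty).items =
      (PySem.List.dedup (events.map (fun ev => pvCat ev.1))).map (fun c => (c, pvGather events c)) := by
  have hstep : pvStepA = fun (d : PySem.Dict String (List Int)) ev => d.modify (pvCat ev.1) [] (· ++ ev.2) :=
    funext fun d => funext fun ev => pvStepA_eq d ev
  rw [hstep]
  have hkeys := PySem.Dict.keys_foldl_modify_key events (fun ev => pvCat ev.1) []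
      (fun d ev => (· ++ ev.2)) (PySem.Dict.empty (κ := String) (ν := List Int))
  have hnd : ((events.foldl (fun d ev => d.modify (pvCat ev.1) [] (· ++ ev.2)) PySem.Dict.empty)).keys.Nodup :=
    PySem.Dict.nodup_keys_foldl_modify_key events (fun ev => pvCat ev.1) []
      (fun d ev => (· ++ ev.2)) PySem.Dict.empty PySem.Dict.nodup_keys_empty
  rw [PySem.Dict.items_eq_map_keys _ hnd []]
  rw [hkeys]
  have hupd : PySem.Set.update (PySem.Dict.empty (κ := String) (ν := List Int)).keys (events.map (fun ev => pvCat ev.1)) = PySem.List.dedup (events.map (fun ev => pvCat ev.1)) := by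
    simp only [pysem, PySem.Set.update, PySem.Set.ofList_eq_foldl, List.foldl_map, PySem.Dict.keys_empty]
  rw [hupd]
  refine List.map_congr_left fun c hc => ?_
  rw [pvGetD_foldl_modify]
  simp

-- ===== VERDICT (by name: the statement is the Claim_ definition above) =====
theorem condense_neural_event_types_spec : Claim_equal_condense_neural_event_types := by
  intro d _hDom hPre
  unfold Spec_condense_neural_event_types condense_neural_event_types condense_neural_event_types_alt
  obtain ⟨hnd, hin⟩ := hPre
  rw [List.foldl_map, PySem.List.foldl_append_singleton_eq_map]
  refine List.map_congr_left fun ca hca => ?_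
  have hlook : (PySem.Dict.mk d).getD ca.1 [] = ca.2 := by
    apply PySem.Dict.getD_of_mem_items (d := PySem.Dict.mk d)
    · exact hca
    · exact hnd
  simp only [hlook]
  rw [PySem.List.foldl_append_singleton_eq_map]
  refine congrArg _ (List.map_congr_left fun ae _hae => ?_)
  rw [pvInner_eq]
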